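-- pv_equiv track=rewrite | github.com/anhducnguyen2006/Google-Kickstart-2022-Round-C | new_password.py | solve
-- ===== SOURCE A (Python) =====
-- def solve(n,s):
--     # create all requirements possible:
--
--     # special character
--     sc = ["#", "@", "*", "&"]
--
--     # small letters from the alphabet
--     alphasmal = ['a','b','c','d','e','f','g','h','i','j','k','l','m','n','o','p','q','r','s','t','u','v','w','x','y','z']
--
--     # capital letters from the alphabet
--     alphabig =  ['A','B','C','D','E','F','G','H','I','J','K','L','M','N','O','P','Q','R','S','T','U','V','W','X','Y','Z']
--
--     # numbers possible
--     num = ['0','1','2','3','4','5','6','7','8','9']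
--
--     # To check if the password (string) contains such characters
--
--     # r1 for numbers
--     # r2 for capital letters
--     # r3 for small letters
--     # r4 for special characters
--
--     r1,r2,r3,r4=False,False,False,False
--
--     # loop through all the elements of the password
--     # change r1/r2/r3/r4 to True if the current letter is in one of
--     # the four requirements
--     for i in s:
--         if i in num:
--             r1=True
--         if i in alphabig:
--             r2=True
--         if i in alphasmal:
--             r3=True
--         if i in sc:
--             r4=True
--
--     #if not, add one of their elements, any is fine
--     if r1==False:
--         s+="1"
--     if r2==False:
--         s+=alphabig[0]
--     if r3==False:
--         s+=alphasmal[0]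
--     if r4==False:
--         s+=sc[0]
--
--     # lastly, check if the length of the password fulfilling all
--     # the requirements is greater than 7, if not,
--     # add anything from the four requirements
--     if len(s)<7:
--         for j in range(7-len(s)):
--             s+="1"
--     return s
-- ===== SOURCE B (Python) =====
-- def solve(n, s):
--     present = set(s)
--     for filler, alphabet in (('1', '0123456789'),
--                              ('A', 'ABCDEFGHIJKLMNOPQRSTUVWXYZ'),
--                              ('a', 'abcdefghijklmnopqrstuvwxyz'),
--                              ('#', '#@*&')):
--         if not any(c in present for c in alphabet):
--             s += filler
--     return s + '1' * max(0, 7 - len(s))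
-- ===== Notes on version B (the rewrite author's own statement) =====
-- stated objective: idiomatic
-- what changed: B builds set(s) once and tests each required class alphabet against it via a data-driven (filler, alphabet) table, replacing A's per-character four-flag loop, and pads with string multiplication instead of a range loop.
import Mathlib
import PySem

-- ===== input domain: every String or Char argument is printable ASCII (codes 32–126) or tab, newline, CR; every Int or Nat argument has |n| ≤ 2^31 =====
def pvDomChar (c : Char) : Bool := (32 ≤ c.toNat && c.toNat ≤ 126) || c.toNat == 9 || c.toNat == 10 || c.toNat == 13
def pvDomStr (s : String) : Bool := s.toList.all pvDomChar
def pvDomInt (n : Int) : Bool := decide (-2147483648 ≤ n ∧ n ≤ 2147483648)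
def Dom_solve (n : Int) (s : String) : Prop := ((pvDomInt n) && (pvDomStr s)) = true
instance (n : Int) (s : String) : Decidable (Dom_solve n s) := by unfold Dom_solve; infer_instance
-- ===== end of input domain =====

-- B replaces A's per-character four-flag scan by per-class membership tests against set(s) (idiomatic decomposition).

-- ===== PORT A =====
def solveSc : List Char := ['#', '@', '*', '&']
def solveSmall : List Char := ['a','b','c','d','e','f','g','h','i','j','k','l','m','n','o','p','q','r','s','t','u','v','w','x','y','z']
def solveBig : List Char := ['A','B','C','D','E','F','G','H','I','J','K','L','M','N','O','P','Q','R','S','T','U','V','W','X','Y','Z']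
def solveNum : List Char := ['0','1','2','3','4','5','6','7','8','9']

def solve (n : Int) (s : String) : String :=
  let r := s.toList.foldl (fun (r : Bool × Bool × Bool × Bool) i =>
      let r1 := if solveNum.contains i then true else r.1
      let r2 := if solveBig.contains i then true else r.2.1
      let r3 := if solveSmall.contains i then true else r.2.2.1
      let r4 := if solveSc.contains i then true else r.2.2.2
      (r1, r2, r3, r4)) (false, false, false, false)
  let l := s.toList
  let l := if r.1 = false then l ++ ['1'] else l
  let l := if r.2.1 = false then l ++ [solveBig.headI] else l
  let l := if r.2.2.1 = false then l ++ [solveSmall.headI] else l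
  let l := if r.2.2.2 = false then l ++ [solveSc.headI] else l
  let l := if (l.length : Int) < 7 then
      (PySem.List.pyRange 0 (7 - (l.length : Int)) 1).foldl (fun acc _ => acc ++ ['1']) l
    else l
  String.mk l

-- ===== PORT B =====
def solveTable : List (Char × List Char) :=
  [('1', "0123456789".toList),
   ('A', "ABCDEFGHIJKLMNOPQRSTUVWXYZ".toList),
   ('a', "abcdefghijklmnopqrstuvwxyz".toList),
   ('#', "#@*&".toList)]

def solve_alt (n : Int) (s : String) : String :=
  let present : PySem.Set Char := PySem.Set.ofList s.toList
  let l := solveTable.foldl (fun (acc : List Char) p =>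
      if p.2.any (fun c => PySem.Set.contains present c) then acc else acc ++ [p.1]) s.toList
  String.mk (l ++ List.replicate (max 0 (7 - (l.length : Int))).toNat '1')

-- ===== PRECONDITION & SPEC =====
def Spec_solve (n : Int) (s : String) (out : String) : Prop := out = solve_alt n s
instance (n : Int) (s : String) (out : String) : Decidable (Spec_solve n s out) := by unfold Spec_solve; infer_instance

-- ===== CLAIM (what is proved, stated in full; the proofs are below) =====
def Claim_equal_solve : Prop := ∀ (n : Int) (s : String), Dom_solve n s → Spec_solve n s (solve n s)

-- ===== LEMMAS AND PROOFS =====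

-- A's flag fold computes the four 'any' tests
theorem solve_fold_flags (l : List Char) (r1 r2 r3 r4 : Bool) :
    l.foldl (fun (r : Bool × Bool × Bool × Bool) i =>
      (r.1 || solveNum.contains i, r.2.1 || solveBig.contains i,
       r.2.2.1 || solveSmall.contains i, r.2.2.2 || solveSc.contains i)) (r1, r2, r3, r4)
    = (r1 || l.any (solveNum.contains ·),
       r2 || l.any (solveBig.contains ·),
       r3 || l.any (solveSmall.contains ·),
       r4 || l.any (solveSc.contains ·)) := by
  induction l generalizing r1 r2 r3 r4 with
  | nil => simp
  | cons c t ih =>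
      rw [List.foldl_cons, ih]
      simp [Bool.or_assoc]

-- B's per-class test against set(s) equals A's per-character 'any' test
theorem any_contains_comm (xs l : List Char) :
    (xs.any fun c => PySem.Set.contains (PySem.Set.ofList l) c) = l.any (xs.contains ·) := by
  rcases h : l.any (xs.contains ·) with _ | _
  · simp only [List.any_eq_false] at h ⊢
    intro c hc
    simp only [PySem.Set.contains_iff, PySem.Set.mem_ofList]
    exact fun hcl => (by simpa using h c hcl : c ∉ xs) hc
  · simp only [List.any_eq_true] at h ⊢
    obtain ⟨c, hcl, hcx⟩ := h
    exact ⟨c, by simpa using hcx, by simp [PySem.Set.mem_ofList, hcl]⟩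

-- appending '1' once per range element is appending a replicate
theorem foldl_append_one (r : List Int) (acc : List Char) :
    r.foldl (fun a _ => a ++ ['1']) acc = acc ++ List.replicate r.length '1' := by
  induction r generalizing acc with
  | nil => simp
  | cons x t ih => simp [ih, List.replicate_succ]

-- A's final padding loop is B's replicate append
theorem pad_eq (m : List Char) :
    (if (m.length : Int) < 7 then
        (PySem.List.pyRange 0 (7 - (m.length : Int)) 1).foldl (fun acc _ => acc ++ ['1']) m
      else m)
    = m ++ List.replicate (max 0 (7 - (m.length : Int))).toNat '1' := by
  by_cases h : (m.length : Int) < 7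
  · rw [if_pos h, foldl_append_one, PySem.List.length_pyRange_one]
    congr 2
    omega
  · rw [if_neg h, show (max 0 (7 - (m.length : Int))).toNat = 0 from by omega]
    simp

-- A's 'if flag = false then append' is B's 'if flag then keep else append'
theorem if_flip (b : Bool) (l : List Char) (x : Char) :
    (if b = false then l ++ [x] else l) = (if b then l else l ++ [x]) := by
  cases b <;> simp

-- ===== VERDICT (by name: the statement is the Claim_ definition above) =====
theorem solve_spec : Claim_equal_solve := by
  intro n s _
  unfold Spec_solve solve solve_alt
  have hbody : (fun (r : Bool × Bool × Bool × Bool) i =>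
      ((if solveNum.contains i then true else r.1),
       (if solveBig.contains i then true else r.2.1),
       (if solveSmall.contains i then true else r.2.2.1),
       (if solveSc.contains i then true else r.2.2.2)))
      = (fun (r : Bool × Bool × Bool × Bool) i =>
      (r.1 || solveNum.contains i, r.2.1 || solveBig.contains i,
       r.2.2.1 || solveSmall.contains i, r.2.2.2 || solveSc.contains i)) := by
    funext r i
    refine Prod.ext ?_ (Prod.ext ?_ (Prod.ext ?_ ?_)) <;> · show (if _ then true else _) = _; split <;> simp_all
  simp only [hbody, solve_fold_flags, Bool.false_or, solveTable, List.foldl_cons,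
    List.foldl_nil, any_contains_comm,
    show ("0123456789".toList) = solveNum from by decide,
    show ("ABCDEFGHIJKLMNOPQRSTUVWXYZ".toList) = solveBig from by decide,
    show ("abcdefghijklmnopqrstuvwxyz".toList) = solveSmall from by decide,
    show ("#@*&".toList) = solveSc from by decide]
  rw [pad_eq]
  congr 1
  simp only [if_flip]
  rfl
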